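-- pv_equiv track=rewrite | github.com/lindolib4/football_ai | toto/optimizer.py | _decision_distribution
-- ===== SOURCE A (Python) =====
-- def _decision_distribution(decisions: list[str]) -> dict[str, int]:
--     distribution = {
--         "single_1": 0,
--         "single_X": 0,
--         "single_2": 0,
--         "double_1X": 0,
--         "double_X2": 0,
--         "double_12": 0,
--         "other": 0,
--     }
--     for decision in decisions:
--         key = "other"
--         if decision == "1":
--             key = "single_1"
--         elif decision == "X":
--             key = "single_X"
--         elif decision == "2":
--             key = "single_2"
--         elif decision == "1X":
--             key = "double_1X"
--         elif decision == "X2":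
--             key = "double_X2"
--         elif decision == "12":
--             key = "double_12"
--         distribution[key] += 1
--     return distribution
-- ===== SOURCE B (Python) =====
-- def _decision_distribution(decisions: list[str]) -> dict[str, int]:
--     # Staged counting passes: one list.count per known category, no per-element
--     # classification; 'other' is derived by subtraction from the total length.
--     single_1 = decisions.count("1")
--     single_X = decisions.count("X")
--     single_2 = decisions.count("2")
--     double_1X = decisions.count("1X")
--     double_X2 = decisions.count("X2")
--     double_12 = decisions.count("12")
--     return {
--         "single_1": single_1,
--         "single_X": single_X,
--         "single_2": single_2,
--         "double_1X": double_1X,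
--         "double_X2": double_X2,
--         "double_12": double_12,
--         "other": len(decisions)
--         - (single_1 + single_X + single_2 + double_1X + double_X2 + double_12),
--     }
-- ===== Notes on version B (the rewrite author's own statement) =====
-- stated objective: idiomatic
-- what changed: A makes a single pass classifying every element with an if/elif chain and mutating a pre-built dict; B makes six independent list.count passes (one per known category), assembles the fixed-key dict from those totals, and derives 'other' by subtracting their sum from len(decisions) instead of ever classifying an element.
import Mathlib
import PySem

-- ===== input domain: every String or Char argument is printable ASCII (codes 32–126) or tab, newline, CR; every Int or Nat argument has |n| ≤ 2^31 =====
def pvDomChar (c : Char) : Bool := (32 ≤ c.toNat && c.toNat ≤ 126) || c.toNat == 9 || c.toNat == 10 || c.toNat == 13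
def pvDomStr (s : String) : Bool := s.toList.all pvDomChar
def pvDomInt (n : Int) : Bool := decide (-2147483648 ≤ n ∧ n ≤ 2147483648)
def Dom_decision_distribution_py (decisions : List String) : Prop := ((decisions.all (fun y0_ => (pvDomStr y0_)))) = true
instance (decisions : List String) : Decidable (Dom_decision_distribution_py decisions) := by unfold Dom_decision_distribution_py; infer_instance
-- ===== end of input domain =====

-- B replaces A's single-pass if/elif classification into a mutable dict by six
-- independent list.count passes plus 'other' by subtraction from the length (idiomatic).


-- ===== PORT A =====
-- one loop iteration of A: the if/elif chain choosing `key`, then distribution[key] += 1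
def ddStepA (dist : PySem.Dict String Int) (decision : String) : PySem.Dict String Int :=
  let key : String :=
    if decision = "1" then "single_1"
    else if decision = "X" then "single_X"
    else if decision = "2" then "single_2"
    else if decision = "1X" then "double_1X"
    else if decision = "X2" then "double_X2"
    else if decision = "12" then "double_12"
    else "other"
  dist.modify key 0 (· + 1)

def decision_distribution_py (decisions : List String) : List (String × Int) :=
  let distribution : PySem.Dict String Int :=
    PySem.Dict.mk [("single_1", 0), ("single_X", 0), ("single_2", 0),
                   ("double_1X", 0), ("double_X2", 0), ("double_12", 0), ("other", 0)]
  (decisions.foldl ddStepA distribution).items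

-- ===== PORT B =====
def decision_distribution_py_alt (decisions : List String) : List (String × Int) :=
  let single_1 := PySem.List.count decisions "1"
  let single_X := PySem.List.count decisions "X"
  let single_2 := PySem.List.count decisions "2"
  let double_1X := PySem.List.count decisions "1X"
  let double_X2 := PySem.List.count decisions "X2"
  let double_12 := PySem.List.count decisions "12"
  [("single_1", single_1), ("single_X", single_X), ("single_2", single_2),
   ("double_1X", double_1X), ("double_X2", double_X2), ("double_12", double_12),
   ("other", (decisions.length : Int)
      - (single_1 + single_X + single_2 + double_1X + double_X2 + double_12))]

-- ===== PRECONDITION & SPEC =====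
def Spec_decision_distribution_py (decisions : List String) (out : List (String × Int)) : Prop := out = decision_distribution_py_alt decisions
instance (decisions : List String) (out : List (String × Int)) : Decidable (Spec_decision_distribution_py decisions out) := by unfold Spec_decision_distribution_py; infer_instance

-- ===== CLAIM (what is proved, stated in full; the proofs are below) =====
def Claim_equal_decision_distribution_py : Prop := ∀ (decisions : List String), Dom_decision_distribution_py decisions → Spec_decision_distribution_py decisions (decision_distribution_py decisions)

-- ===== LEMMAS AND PROOFS =====
lemma mod1 (a b c d e f g : Int) :
    (PySem.Dict.mk [("single_1", a), ("single_X", b), ("single_2", c), ("double_1X", d), ("double_X2", e), ("double_12", f), ("other", g)]).modify "single_1" 0 (· + 1) = PySem.Dict.mk [("single_1", a + 1), ("single_X", b), ("single_2", c), ("double_1X", d), ("double_X2", e), ("double_12", f), ("other", g)] := by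
  apply PySem.Dict.ext
  simp [PySem.Dict.modify, PySem.Dict.insert, PySem.Dict.contains, PySem.Dict.getD, PySem.Dict.get?]

lemma mod2 (a b c d e f g : Int) :
    (PySem.Dict.mk [("single_1", a), ("single_X", b), ("single_2", c), ("double_1X", d), ("double_X2", e), ("double_12", f), ("other", g)]).modify "single_X" 0 (· + 1) = PySem.Dict.mk [("single_1", a), ("single_X", b + 1), ("single_2", c), ("double_1X", d), ("double_X2", e), ("double_12", f), ("other", g)] := by
  apply PySem.Dict.ext
  simp [PySem.Dict.modify, PySem.Dict.insert, PySem.Dict.contains, PySem.Dict.getD, PySem.Dict.get?]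

lemma mod3 (a b c d e f g : Int) :
    (PySem.Dict.mk [("single_1", a), ("single_X", b), ("single_2", c), ("double_1X", d), ("double_X2", e), ("double_12", f), ("other", g)]).modify "single_2" 0 (· + 1) = PySem.Dict.mk [("single_1", a), ("single_X", b), ("single_2", c + 1), ("double_1X", d), ("double_X2", e), ("double_12", f), ("other", g)] := by
  apply PySem.Dict.ext
  simp [PySem.Dict.modify, PySem.Dict.insert, PySem.Dict.contains, PySem.Dict.getD, PySem.Dict.get?]

lemma mod4 (a b c d e f g : Int) :
    (PySem.Dict.mk [("single_1", a), ("single_X", b), ("single_2", c), ("double_1X", d), ("double_X2", e), ("double_12", f), ("other", g)]).modify "double_1X" 0 (· + 1) = PySem.Dict.mk [("single_1", a), ("single_X", b), ("single_2", c), ("double_1X", d + 1), ("double_X2", e), ("double_12", f), ("other", g)] := by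
  apply PySem.Dict.ext
  simp [PySem.Dict.modify, PySem.Dict.insert, PySem.Dict.contains, PySem.Dict.getD, PySem.Dict.get?]

lemma mod5 (a b c d e f g : Int) :
    (PySem.Dict.mk [("single_1", a), ("single_X", b), ("single_2", c), ("double_1X", d), ("double_X2", e), ("double_12", f), ("other", g)]).modify "double_X2" 0 (· + 1) = PySem.Dict.mk [("single_1", a), ("single_X", b), ("single_2", c), ("double_1X", d), ("double_X2", e + 1), ("double_12", f), ("other", g)] := by
  apply PySem.Dict.ext
  simp [PySem.Dict.modify, PySem.Dict.insert, PySem.Dict.contains, PySem.Dict.getD, PySem.Dict.get?]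

lemma mod6 (a b c d e f g : Int) :
    (PySem.Dict.mk [("single_1", a), ("single_X", b), ("single_2", c), ("double_1X", d), ("double_X2", e), ("double_12", f), ("other", g)]).modify "double_12" 0 (· + 1) = PySem.Dict.mk [("single_1", a), ("single_X", b), ("single_2", c), ("double_1X", d), ("double_X2", e), ("double_12", f + 1), ("other", g)] := by
  apply PySem.Dict.ext
  simp [PySem.Dict.modify, PySem.Dict.insert, PySem.Dict.contains, PySem.Dict.getD, PySem.Dict.get?]

lemma mod7 (a b c d e f g : Int) :
    (PySem.Dict.mk [("single_1", a), ("single_X", b), ("single_2", c), ("double_1X", d), ("double_X2", e), ("double_12", f), ("other", g)]).modify "other" 0 (· + 1) = PySem.Dict.mk [("single_1", a), ("single_X", b), ("single_2", c), ("double_1X", d), ("double_X2", e), ("double_12", f), ("other", g + 1)] := by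
  apply PySem.Dict.ext
  simp [PySem.Dict.modify, PySem.Dict.insert, PySem.Dict.contains, PySem.Dict.getD, PySem.Dict.get?]

-- invariant of A's loop: it adds each key's count to the starting values, in place
lemma foldA_items (ds : List String) (a b c d e f g : Int) :
    (ds.foldl ddStepA (PySem.Dict.mk
        [("single_1", a), ("single_X", b), ("single_2", c),
         ("double_1X", d), ("double_X2", e), ("double_12", f), ("other", g)])).items =
    [("single_1", a + ds.count "1"), ("single_X", b + ds.count "X"),
     ("single_2", c + ds.count "2"), ("double_1X", d + ds.count "1X"),
     ("double_X2", e + ds.count "X2"), ("double_12", f + ds.count "12"),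
     ("other", g + (ds.countP (fun s =>
        !(s == "1" || s == "X" || s == "2" || s == "1X" || s == "X2" || s == "12")) : Int))] := by
  induction ds generalizing a b c d e f g with
  | nil => simp
  | cons x xs ih =>
    rw [List.foldl_cons]
    by_cases h1 : x = "1"
    · simp only [ddStepA, h1, String.reduceEq, if_true, if_false, ite_true, ite_false, reduceIte]
      rw [mod1, ih]
      simp [h1, List.count_cons, List.countP_cons]
      push_cast; ring
    by_cases h2 : x = "X"
    · simp only [ddStepA, h1, h2, String.reduceEq, if_true, if_false, ite_true, ite_false, reduceIte]
      rw [mod2, ih]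
      simp [h1, h2, List.count_cons, List.countP_cons]
      push_cast; ring
    by_cases h3 : x = "2"
    · simp only [ddStepA, h1, h2, h3, String.reduceEq, if_true, if_false, ite_true, ite_false, reduceIte]
      rw [mod3, ih]
      simp [h1, h2, h3, List.count_cons, List.countP_cons]
      push_cast; ring
    by_cases h4 : x = "1X"
    · simp only [ddStepA, h1, h2, h3, h4, String.reduceEq, if_true, if_false, ite_true, ite_false, reduceIte]
      rw [mod4, ih]
      simp [h1, h2, h3, h4, List.count_cons, List.countP_cons]
      push_cast; ring
    by_cases h5 : x = "X2"
    · simp only [ddStepA, h1, h2, h3, h4, h5, String.reduceEq, if_true, if_false, ite_true, ite_false, reduceIte]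
      rw [mod5, ih]
      simp [h1, h2, h3, h4, h5, List.count_cons, List.countP_cons]
      push_cast; ring
    by_cases h6 : x = "12"
    · simp only [ddStepA, h1, h2, h3, h4, h5, h6, String.reduceEq, if_true, if_false, ite_true, ite_false, reduceIte]
      rw [mod6, ih]
      simp [h1, h2, h3, h4, h5, h6, List.count_cons, List.countP_cons]
      push_cast; ring
    · simp only [ddStepA, h1, h2, h3, h4, h5, h6, if_false, ite_false, if_neg h1, if_neg h2, if_neg h3, if_neg h4, if_neg h5, if_neg h6]
      rw [mod7, ih]
      simp [h1, h2, h3, h4, h5, h6, List.count_cons, List.countP_cons]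
      push_cast; ring

-- the six key counts plus the rest partition the list's length
lemma count_partition (ds : List String) :
    ds.count "1" + ds.count "X" + ds.count "2" + ds.count "1X" + ds.count "X2" + ds.count "12"
      + ds.countP (fun s =>
          !(s == "1" || s == "X" || s == "2" || s == "1X" || s == "X2" || s == "12")) = ds.length := by
  induction ds with
  | nil => simp
  | cons x xs ih =>
    simp only [List.count_cons, List.countP_cons, List.length_cons]
    split_ifs with h1 h2 h3 h4 h5 h6 h7 <;> simp_all <;> omega

-- ===== VERDICT (by name: the statement is the Claim_ definition above) =====
theorem decision_distribution_py_spec : Claim_equal_decision_distribution_py := by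
  intro ds _
  unfold Spec_decision_distribution_py decision_distribution_py decision_distribution_py_alt
  rw [foldA_items]
  have h := count_partition ds
  simp only [PySem.List.count_eq, zero_add, List.cons.injEq, Prod.mk.injEq, and_true, true_and]
  omega
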